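-- pv_equiv track=rewrite | github.com/angrychow/dct-transform | hufffman.py | unpad_bits
-- ===== SOURCE A (Python) =====
-- def unpad_bits(data):
--     unpadded_data = ""
--     count = 0
--     for bit in data:
--         if bit == "1":
--             count += 1
--             unpadded_data += bit
--         else:
--             if(count != 5):
--                 unpadded_data += bit
--             count = 0
--     return unpadded_data
-- ===== SOURCE B (Python) =====
-- def unpad_bits(data):
--     out = []
--     i = 0
--     n = len(data)
--     while i < n:
--         j = i
--         while j < n and data[j] == "1":
--             j += 1
--         out.append(data[i:j])
--         k = j - i
--         i = j
--         while j < n and data[j] != "1":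
--             j += 1
--         run = data[i:j]
--         out.append(run[1:] if k == 5 else run)
--         i = j
--     return "".join(out)
-- ===== Notes on version B (the rewrite author's own statement) =====
-- stated objective: alternative
-- what changed: B scans the string as alternating runs (a run of '1's, then a run of non-'1's) with a two-pointer while loop, dropping the first character of a non-ones run exactly when the preceding ones-run has length 5, and joins the kept slices once at the end, instead of A's per-character loop with a running counter and string +=.
import Mathlib
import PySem

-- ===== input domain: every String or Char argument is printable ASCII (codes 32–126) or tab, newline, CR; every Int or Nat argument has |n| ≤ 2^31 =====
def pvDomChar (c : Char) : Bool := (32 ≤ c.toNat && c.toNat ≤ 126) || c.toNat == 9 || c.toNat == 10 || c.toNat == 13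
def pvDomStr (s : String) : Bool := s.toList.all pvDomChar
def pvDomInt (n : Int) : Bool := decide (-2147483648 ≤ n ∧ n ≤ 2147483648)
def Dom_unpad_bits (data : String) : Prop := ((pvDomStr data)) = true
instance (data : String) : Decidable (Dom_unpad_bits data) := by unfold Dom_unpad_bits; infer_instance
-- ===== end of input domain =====

-- B walks the input as alternating runs (ones-run, then non-ones-run) with two pointers and
-- joins kept slices at the end, instead of A's per-character counter loop; return values proved equal.

-- ===== PORT A =====
-- per-character loop: count consecutive '1's, drop a non-'1' char exactly when count = 5
def unpad_bits (data : String) : String :=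
  (data.toList.foldl
    (fun (st : String × Int) bit =>
      if bit = '1' then (st.1.push bit, st.2 + 1)
      else ((if st.2 ≠ 5 then st.1.push bit else st.1), 0))
    ("", 0)).1

-- ===== PORT B =====
-- termination measure for the run-scanning loop (cited by decreasing_by)
theorem pvRunsDec (b : Char) (rest : List Char) :
    (((b :: rest).dropWhile (· == '1')).dropWhile (· != '1')).length < (b :: rest).length := by
  by_cases h : (b == '1') = true
  · have h1 : (b :: rest).dropWhile (· == '1') = rest.dropWhile (· == '1') := by
      simp [List.dropWhile, h]
    calc (((b :: rest).dropWhile (· == '1')).dropWhile (· != '1')).length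
        ≤ ((b :: rest).dropWhile (· == '1')).length := List.length_dropWhile_le _ _
      _ = (rest.dropWhile (· == '1')).length := by rw [h1]
      _ ≤ rest.length := List.length_dropWhile_le _ _
      _ < (b :: rest).length := by simp
  · have h1 : (b :: rest).dropWhile (· == '1') = b :: rest := by
      simp [List.dropWhile, h]
    have h2 : (b :: rest).dropWhile (· != '1') = rest.dropWhile (· != '1') := by
      rw [List.dropWhile_cons]
      have hb : ¬ b = '1' := by simpa using h
      simp [hb]
    calc (((b :: rest).dropWhile (· == '1')).dropWhile (· != '1')).length
        = (rest.dropWhile (· != '1')).length := by rw [h1, h2]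
      _ ≤ rest.length := List.length_dropWhile_le _ _
      _ < (b :: rest).length := by simp

-- inner while loops 'while data[j]=="1"' / slice data[i:j] become takeWhile/dropWhile on the char list
def unpadRuns : List Char → List Char
  | [] => []
  | b :: rest =>
    let ones := (b :: rest).takeWhile (· == '1')
    let nonones := ((b :: rest).dropWhile (· == '1')).takeWhile (· != '1')
    let r2 := ((b :: rest).dropWhile (· == '1')).dropWhile (· != '1')
    ones ++ (if ones.length == 5 then nonones.tail else nonones) ++ unpadRuns r2
termination_by l => l.length
decreasing_by exact pvRunsDec b rest

def unpad_bits_alt (data : String) : String := String.ofList (unpadRuns data.toList)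

-- ===== PRECONDITION & SPEC =====
def Spec_unpad_bits (data : String) (out : String) : Prop := out = unpad_bits_alt data
instance (data : String) (out : String) : Decidable (Spec_unpad_bits data out) := by unfold Spec_unpad_bits; infer_instance

-- ===== CLAIM (what is proved, stated in full; the proofs are below) =====
def Claim_equal_unpad_bits : Prop := ∀ (data : String), Dom_unpad_bits data → Spec_unpad_bits data (unpad_bits data)

-- ===== LEMMAS AND PROOFS =====

-- list-level reading of A's fold: c = count of consecutive ones seen so far
def alist (c : Int) : List Char → List Char
  | [] => []
  | b :: rest =>
    if b = '1' then b :: alist (c + 1) rest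
    else (if c ≠ 5 then b :: alist 0 rest else alist 0 rest)

theorem singleton_eq (c : Char) : String.singleton c = String.ofList [c] := rfl

theorem fold_eq_alist (l : List Char) : ∀ (s : String) (c : Int),
    (l.foldl
      (fun (st : String × Int) bit =>
        if bit = '1' then (st.1.push bit, st.2 + 1)
        else ((if st.2 ≠ 5 then st.1.push bit else st.1), 0))
      (s, c)).1 = s ++ String.ofList (alist c l) := by
  induction l with
  | nil => intro s c; simp [alist]
  | cons b rest ih =>
    intro s c
    simp only [List.foldl]
    by_cases hb : b = '1'
    · rw [if_pos hb, ih, String.push_eq_append, String.append_assoc,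
        show alist c (b :: rest) = b :: alist (c + 1) rest by simp [alist, hb],
        show (b :: alist (c + 1) rest) = [b] ++ alist (c + 1) rest from rfl,
        String.ofList_append, singleton_eq]
    · by_cases hc : c ≠ 5
      · rw [if_neg hb, if_pos hc, ih, String.push_eq_append, String.append_assoc,
          show alist c (b :: rest) = b :: alist 0 rest by simp [alist, hb, hc],
          show (b :: alist 0 rest) = [b] ++ alist 0 rest from rfl,
          String.ofList_append, singleton_eq]
      · rw [if_neg hb, if_neg hc, ih,
          show alist c (b :: rest) = alist 0 rest by simp [alist, hb, hc]]

theorem alist_ones : ∀ (ones : List Char), (∀ x ∈ ones, x = '1') →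
    ∀ (c : Int) (rest : List Char),
      alist c (ones ++ rest) = ones ++ alist (c + ones.length) rest := by
  intro ones
  induction ones with
  | nil => intro _ c rest; simp
  | cons b t ih =>
    intro h c rest
    have hb : b = '1' := h b (by simp)
    have hcast : c + 1 + (t.length : Int) = c + ((b :: t).length : Int) := by
      simp; ring
    simp only [List.cons_append, alist, if_pos hb,
      ih (fun x hx => h x (by simp [hx])) (c + 1) rest]
    rw [hcast]

theorem alist_nonones : ∀ (ns : List Char), (∀ x ∈ ns, x ≠ '1') →
    ∀ (rest : List Char), alist 0 (ns ++ rest) = ns ++ alist 0 rest := by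
  intro ns
  induction ns with
  | nil => intro _ rest; simp
  | cons b t ih =>
    intro h rest
    have hb : b ≠ '1' := h b (by simp)
    have h0 : (0 : Int) ≠ 5 := by norm_num
    simp only [List.cons_append, alist, if_neg hb, if_pos h0,
      ih (fun x hx => h x (by simp [hx])) rest]

theorem unpadRuns_eq_alist : ∀ (n : Nat) (l : List Char), l.length ≤ n →
    unpadRuns l = alist 0 l := by
  intro n
  induction n with
  | zero =>
    intro l hl
    have : l = [] := List.length_eq_zero_iff.mp (Nat.le_zero.mp hl)
    subst this; simp [unpadRuns, alist]
  | succ n ihn =>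
    intro l hl
    rcases l with _ | ⟨b, rest⟩
    · simp [unpadRuns, alist]
    · rw [unpadRuns]
      set ones := (b :: rest).takeWhile (· == '1') with hones_def
      set r1 := (b :: rest).dropWhile (· == '1') with hr1_def
      have hsplit1 : ones ++ r1 = b :: rest := List.takeWhile_append_dropWhile
      set nonones := r1.takeWhile (· != '1') with hnn_def
      set r2 := r1.dropWhile (· != '1') with hr2_def
      have hsplit2 : nonones ++ r2 = r1 := List.takeWhile_append_dropWhile
      have hr2len : r2.length ≤ n := by
        have := pvRunsDec b rest
        rw [← hr1_def, ← hr2_def] at this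
        omega
      have ihr2 : unpadRuns r2 = alist 0 r2 := ihn r2 hr2len
      have hones : ∀ x ∈ ones, x = '1' := by
        intro x hx
        have := List.mem_takeWhile_imp hx
        simpa using this
      have hns : ∀ x ∈ nonones, x ≠ '1' := by
        intro x hx
        have := List.mem_takeWhile_imp hx
        simpa using this
      have hA : alist 0 (b :: rest) = ones ++ alist ((ones.length : Int)) r1 := by
        rw [← hsplit1, alist_ones ones hones 0 r1]
        simp
      rcases hnn : nonones with _ | ⟨b', ns⟩
      · -- nonones empty forces r1 (hence r2) empty: r1's head is never '1'
        have hr1nil : r1 = [] := by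
          rcases hr : r1 with _ | ⟨x, xs⟩
          · rfl
          · exfalso
            have hx : (x == '1') = false := by
              have h := List.head?_dropWhile_not (· == '1') (b :: rest)
              rw [← hr1_def, hr] at h
              simpa using h
            have : nonones = x :: xs.takeWhile (· != '1') := by
              rw [hnn_def, hr, List.takeWhile_cons]
              have hx' : ¬ x = '1' := by simpa using hx
              simp [hx']
            rw [hnn] at this
            exact List.cons_ne_nil x _ this.symm
        have hr2nil : r2 = [] := by rw [hr2_def, hr1nil]; rfl
        rw [hA, hr1nil, hr2nil]
        simp [alist, unpadRuns]
      · have hb' : b' ≠ '1' := hns b' (by simp [hnn])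
        have hA2 : alist ((ones.length : Int)) r1
            = (if (ones.length : Int) ≠ 5 then b' :: alist 0 (ns ++ r2) else alist 0 (ns ++ r2)) := by
          rw [← hsplit2, hnn]
          simp [alist, hb']
        have hns' : ∀ x ∈ ns, x ≠ '1' := fun x hx => hns x (by simp [hnn, hx])
        by_cases h5 : (ones.length == 5) = true
        · have h5i : ¬ ((ones.length : Int) ≠ 5) := by simp at h5 ⊢; omega
          rw [hA, hA2, if_neg h5i, alist_nonones ns hns' r2, ← ihr2]
          simp [h5, List.append_assoc]
        · have h5i : (ones.length : Int) ≠ 5 := by simp at h5 ⊢; omega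
          rw [hA, hA2, if_pos h5i, alist_nonones ns hns' r2, ← ihr2]
          simp [h5, List.append_assoc]

-- ===== VERDICT (by name: the statement is the Claim_ definition above) =====
theorem unpad_bits_spec : Claim_equal_unpad_bits := by
  intro data _
  unfold Spec_unpad_bits unpad_bits unpad_bits_alt
  rw [fold_eq_alist, ← unpadRuns_eq_alist data.toList.length data.toList le_rfl]
  simp
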